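-- pv_equiv track=rewrite | github.com/kilomeow/git-data-tools | diff.py | prepare_line
-- ===== SOURCE A (Python) =====
-- indent = "    "
--
-- def prepare_line(l):
--     indent_level = 0
--     pure_line = ''
--     is_identation = True
--     for i in range(len(l)):
--         if is_identation:
--             t = i%len(indent)
--             if l[i] == indent[t]:
--                 if t+1 == len(indent): indent_level += 1
--             else:
--                 pure_line += l[i]
--                 is_identation = False
--         else:
--             if l[i] == '\n': break
--             pure_line += l[i]
--     return (indent_level, pure_line)
-- ===== SOURCE B (Python) =====
-- def prepare_line(l):
--     leading = len(l) - len(l.lstrip(' '))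
--     return (leading // 4, l[leading:].split('\n', 1)[0])
-- ===== Notes on version B (the rewrite author's own statement) =====
-- stated objective: simpler
-- what changed: Replaced the per-character indentation state machine (index-modulo test, is_identation flag, char-by-char accumulation) with a direct leading-space count via lstrip, integer division by 4, and one split('\n') of the remainder.
-- intended difference: On lines whose first non-space character is a newline, A keeps that newline (and the whole following physical line) inside pure_line, while B returns the empty stripped line; a stripped single line should never contain a newline, so B's value is the intended one. — e.g. on prepare_line("\nx"): A returns (0, "\nx"), B returns (0, "")
import Mathlib
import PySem

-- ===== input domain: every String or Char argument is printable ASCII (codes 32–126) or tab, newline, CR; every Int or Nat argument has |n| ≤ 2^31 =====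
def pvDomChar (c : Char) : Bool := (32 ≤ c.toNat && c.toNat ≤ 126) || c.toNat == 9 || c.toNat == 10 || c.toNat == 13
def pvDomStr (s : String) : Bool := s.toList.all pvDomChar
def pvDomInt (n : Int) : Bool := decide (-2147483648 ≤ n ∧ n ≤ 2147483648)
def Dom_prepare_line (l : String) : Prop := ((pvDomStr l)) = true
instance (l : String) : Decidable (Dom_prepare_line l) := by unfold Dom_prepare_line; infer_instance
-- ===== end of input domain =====

-- B replaces A's per-character indentation state machine by a leading-space count,
-- integer division by 4 and a single split on '\n'; objective: simpler (no speed claim).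
-- Intended difference (D_): where the first non-space char is a newline, A keeps it in pure_line, B strips it.

-- ===== PORT A =====
-- A's loop: state (indent_level, pure_line, is_identation), index i over l;
-- indent = "    ", so len(indent) = 4 and indent[t] = ' ' for every t = i % 4.
def pvLoopA : List Char → Nat → Int → List Char → Bool → Int × List Char
  | [], _, lvl, pure, _ => (lvl, pure)
  | c :: rest, i, lvl, pure, isInd =>
    if isInd then
      let t := i % 4
      if c = ' ' then
        pvLoopA rest (i + 1) (if t + 1 = 4 then lvl + 1 else lvl) pure true
      else
        pvLoopA rest (i + 1) lvl (pure ++ [c]) false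
    else
      if c = '\n' then (lvl, pure)      -- break
      else pvLoopA rest (i + 1) lvl (pure ++ [c]) false

def prepare_line (l : String) : Int × String :=
  let r := pvLoopA l.toList 0 0 [] true
  (r.1, String.ofList r.2)

-- ===== PORT B =====
def prepare_line_alt (l : String) : Int × String :=
  let cs := l.toList
  -- leading = len(l) - len(l.lstrip(' '))
  let leading := cs.length - (cs.dropWhile (· = ' ')).length
  -- l[leading:].split('\n', 1)[0]
  let pure_line := (cs.drop leading).takeWhile (· ≠ '\n')
  (((leading / 4 : Nat) : Int), String.ofList pure_line)       -- leading // 4, leading ≥ 0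

-- ===== PRECONDITION & SPEC =====
-- On lines whose first non-space character is a newline, A returns that newline (and the
-- following physical line) inside pure_line, while B returns the empty stripped line;
-- a stripped single line should never contain a newline, so B's value is the intended one.
def D_prepare_line (l : String) : Prop :=
  (l.toList.dropWhile (· = ' ')).head? = some '\n'
instance (l : String) : Decidable (D_prepare_line l) := by unfold D_prepare_line; infer_instance

def Spec_prepare_line (l : String) (out : Int × String) : Prop :=
  ¬ D_prepare_line l → out = prepare_line_alt l
instance (l : String) (out : Int × String) : Decidable (Spec_prepare_line l out) := by
  unfold Spec_prepare_line; infer_instance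

def pvDiffWitness_prepare_line : String := "\nx"
def pvDiffWitnessOut_prepare_line : (Int × String) × (Int × String) := ((0, "\nx"), (0, ""))

-- ===== CLAIM (what is proved, stated in full; the proofs are below) =====
def Claim_unchanged_prepare_line : Prop :=
  ∀ (l : String), Dom_prepare_line l → Spec_prepare_line l (prepare_line l)
def Claim_changed_prepare_line : Prop :=
  Dom_prepare_line (pvDiffWitness_prepare_line) ∧ D_prepare_line (pvDiffWitness_prepare_line) ∧
  prepare_line (pvDiffWitness_prepare_line) = pvDiffWitnessOut_prepare_line.1 ∧
  prepare_line_alt (pvDiffWitness_prepare_line) = pvDiffWitnessOut_prepare_line.2 ∧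
  pvDiffWitnessOut_prepare_line.1 ≠ pvDiffWitnessOut_prepare_line.2
def Claim_exact_prepare_line : Prop :=
  ∀ (l : String), Dom_prepare_line l → D_prepare_line l → prepare_line l ≠ prepare_line_alt l

-- ===== LEMMAS AND PROOFS =====

-- after is_identation turned false, A copies chars until a newline
theorem pvLoopA_false (rest : List Char) : ∀ (i : Nat) (lvl : Int) (pure : List Char),
    pvLoopA rest i lvl pure false = (lvl, pure ++ rest.takeWhile (· ≠ '\n')) := by
  induction rest with
  | nil => intro i lvl pure; simp [pvLoopA]
  | cons c cs ih =>
    intro i lvl pure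
    by_cases h : c = '\n'
    · simp [pvLoopA, h]
    · simp [pvLoopA, h, ih]

-- the indentation phase over k leading spaces counts ⌊·/4⌋ levels
theorem pvLoopA_spaces (k : Nat) : ∀ (rest : List Char) (i : Nat) (lvl : Int) (pure : List Char),
    pvLoopA (List.replicate k ' ' ++ rest) i lvl pure true
      = pvLoopA rest (i + k) (lvl + (((i + k) / 4 : Nat) : Int) - ((i / 4 : Nat) : Int)) pure true := by
  induction k with
  | zero => intro rest i lvl pure; simp
  | succ k ih =>
    intro rest i lvl pure
    have hrepl : List.replicate (k + 1) ' ' ++ rest = ' ' :: (List.replicate k ' ' ++ rest) := by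
      simp [List.replicate_succ]
    have step : pvLoopA (' ' :: (List.replicate k ' ' ++ rest)) i lvl pure true
        = pvLoopA (List.replicate k ' ' ++ rest) (i + 1)
            (if i % 4 + 1 = 4 then lvl + 1 else lvl) pure true := by
      simp [pvLoopA]
    rw [hrepl, step, ih]
    have h2 : (if i % 4 + 1 = 4 then lvl + 1 else lvl)
          + (((i + 1 + k) / 4 : Nat) : Int) - (((i + 1) / 4 : Nat) : Int)
        = lvl + (((i + (k + 1)) / 4 : Nat) : Int) - ((i / 4 : Nat) : Int) := by
      split_ifs with h <;> omega
    rw [h2, show i + 1 + k = i + (k + 1) from by omega]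

theorem takeWhile_space_replicate (cs : List Char) :
    cs.takeWhile (· = ' ') = List.replicate (cs.takeWhile (· = ' ')).length ' ' := by
  rw [List.eq_replicate_iff]
  refine ⟨rfl, ?_⟩
  intro b hb
  have := List.mem_takeWhile_imp hb
  simpa using this

-- both results, expressed through k = number of leading spaces and d = the rest
theorem prepare_line_closed (l : String) :
    prepare_line l =
      (((((l.toList.takeWhile (· = ' ')).length) / 4 : Nat) : Int),
        String.ofList ((l.toList.dropWhile (· = ' ')).take 1
          ++ ((l.toList.dropWhile (· = ' ')).drop 1).takeWhile (· ≠ '\n'))) := by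
  unfold prepare_line
  set cs := l.toList with hcs
  set k := (cs.takeWhile (· = ' ')).length with hk
  set d := cs.dropWhile (· = ' ') with hd
  have hsplit : cs = List.replicate k ' ' ++ d := by
    conv_lhs => rw [← List.takeWhile_append_dropWhile (p := (· = ' ')) (l := cs)]
    rw [← takeWhile_space_replicate]
  have key : pvLoopA cs 0 0 [] true
      = (((k / 4 : Nat) : Int), d.take 1 ++ (d.drop 1).takeWhile (· ≠ '\n')) := by
    conv_lhs => rw [hsplit]
    rw [pvLoopA_spaces]
    cases hrest : d with
    | nil => simp [pvLoopA]
    | cons c cs' =>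
      have hc : ¬ (c = ' ') := by
        have h := List.head?_dropWhile_not (p := (· = ' ')) (l := cs)
        rw [← hd, hrest] at h
        simpa using h
      have step : pvLoopA (c :: cs') (0 + k) (0 + (((0 + k) / 4 : Nat) : Int) - ((0 / 4 : Nat) : Int)) [] true
          = pvLoopA cs' (0 + k + 1) (0 + (((0 + k) / 4 : Nat) : Int) - ((0 / 4 : Nat) : Int)) ([] ++ [c]) false := by
        simp [pvLoopA, hc]
      rw [step, pvLoopA_false]
      simp
  simp only [key]

theorem prepare_line_alt_closed (l : String) :
    prepare_line_alt l =
      (((((l.toList.takeWhile (· = ' ')).length) / 4 : Nat) : Int),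
        String.ofList ((l.toList.dropWhile (· = ' ')).takeWhile (· ≠ '\n'))) := by
  unfold prepare_line_alt
  set cs := l.toList with hcs
  set k := (cs.takeWhile (· = ' ')).length with hk
  set d := cs.dropWhile (· = ' ') with hd
  have hsplit : cs = List.replicate k ' ' ++ d := by
    conv_lhs => rw [← List.takeWhile_append_dropWhile (p := (· = ' ')) (l := cs)]
    rw [← takeWhile_space_replicate]
  have hlen : cs.length - d.length = k := by
    have := congrArg List.length hsplit
    simp at this
    omega
  have hdrop : cs.drop k = d := by
    conv_lhs => rw [hsplit]
    exact List.drop_left' (by simp)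
  dsimp only
  rw [← hd, hlen, hdrop]

-- ===== VERDICT (by name: the statements are the Claim_ definitions above) =====
theorem prepare_line_spec : Claim_unchanged_prepare_line := by
  intro l _ hnd
  rw [prepare_line_closed, prepare_line_alt_closed]
  cases hrest : l.toList.dropWhile (· = ' ') with
  | nil => simp
  | cons c cs' =>
    have hc : c ≠ '\n' := by
      intro h
      exact hnd (by unfold D_prepare_line; rw [hrest, h]; rfl)
    simp [hc]

theorem prepare_line_changed : Claim_changed_prepare_line := by
  unfold Claim_changed_prepare_line; decide

theorem prepare_line_tight : Claim_exact_prepare_line := by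
  intro l _ hd
  rw [prepare_line_closed, prepare_line_alt_closed]
  unfold D_prepare_line at hd
  cases hrest : l.toList.dropWhile (· = ' ') with
  | nil => rw [hrest] at hd; simp at hd
  | cons c cs' =>
    rw [hrest] at hd
    have hc : c = '\n' := by simpa using hd
    intro h
    have h2 := congrArg (fun p => p.2.toList) h
    simp [hc] at h2
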